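-- pv_equiv track=rewrite | github.com/ThunderFun/ComfyUI-Flux2-INT8 | lora_utils.py | detect_lora_format
-- ===== SOURCE A (Python) =====
-- def detect_lora_format(state_dict):
--     keys = list(state_dict.keys())
--
--     if any("lora_down" in k for k in keys):
--         return "kohya"
--     elif any("lora_A" in k for k in keys):
--         return "peft"
--     elif any(".down.weight" in k for k in keys) or any(".down_proj.weight" in k for k in keys):
--         return "standard"
--
--     return "unknown"
-- ===== SOURCE B (Python) =====
-- def detect_lora_format(state_dict):
--     # Classify each key independently into a priority rank, then reduce with min:
--     # the dict's format is the best (lowest-rank) classification of any single key.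
--     def rank(k):
--         if "lora_down" in k:
--             return 0
--         if "lora_A" in k:
--             return 1
--         if ".down.weight" in k or ".down_proj.weight" in k:
--             return 2
--         return 3
--     best = min(map(rank, state_dict.keys()), default=3)
--     return ("kohya", "peft", "standard", "unknown")[best]
-- ===== Notes on version B (the rewrite author's own statement) =====
-- stated objective: alternative
-- what changed: Replaces A's four per-pattern any() scans of the key list with a map-reduce: each key is classified independently into a numeric priority rank, the ranks are reduced with min, and the result indexes a name table.
import Mathlib
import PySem

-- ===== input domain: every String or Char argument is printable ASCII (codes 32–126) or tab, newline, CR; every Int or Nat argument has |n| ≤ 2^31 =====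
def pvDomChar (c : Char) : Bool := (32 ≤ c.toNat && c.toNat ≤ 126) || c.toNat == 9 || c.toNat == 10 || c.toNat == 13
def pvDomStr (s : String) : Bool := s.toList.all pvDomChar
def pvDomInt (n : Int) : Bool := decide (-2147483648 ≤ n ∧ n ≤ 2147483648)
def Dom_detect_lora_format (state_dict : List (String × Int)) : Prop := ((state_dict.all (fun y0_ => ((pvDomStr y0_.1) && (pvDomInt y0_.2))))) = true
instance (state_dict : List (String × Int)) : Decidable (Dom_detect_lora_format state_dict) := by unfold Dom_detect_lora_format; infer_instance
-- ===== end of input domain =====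

-- B classifies each key independently into a priority rank and reduces with min, instead of A's four per-pattern any() scans (alternative decomposition; same return value).

-- ===== PORT A =====
-- A: four short-circuiting any(... in k for k in keys) scans tried in priority order.
def detect_lora_format (state_dict : List (String × Int)) : String :=
  let keys := state_dict.map (·.1)
  if keys.any (fun k => PySem.Str.isIn "lora_down" k) then "kohya"
  else if keys.any (fun k => PySem.Str.isIn "lora_A" k) then "peft"
  else if (keys.any (fun k => PySem.Str.isIn ".down.weight" k)
        || keys.any (fun k => PySem.Str.isIn ".down_proj.weight" k)) then "standard"
  else "unknown"

-- ===== PORT B =====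
-- Source B's rank(k): classify one key into a priority rank.
def pvRank (k : String) : Nat :=
  if PySem.Str.isIn "lora_down" k then 0
  else if PySem.Str.isIn "lora_A" k then 1
  else if PySem.Str.isIn ".down.weight" k || PySem.Str.isIn ".down_proj.weight" k then 2
  else 3

-- min(map(rank, keys), default=3) is rendered as a min-fold seeded with the default 3
-- (exact here since every rank ≤ 3); the tuple indexing becomes a match on the rank.
def detect_lora_format_alt (state_dict : List (String × Int)) : String :=
  let best := (state_dict.map (fun kv => pvRank kv.1)).foldl min 3
  match best with
  | 0 => "kohya"
  | 1 => "peft"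
  | 2 => "standard"
  | _ => "unknown"

-- ===== PRECONDITION & SPEC =====
def Spec_detect_lora_format (state_dict : List (String × Int)) (out : String) : Prop := out = detect_lora_format_alt state_dict
instance (state_dict : List (String × Int)) (out : String) : Decidable (Spec_detect_lora_format state_dict out) := by unfold Spec_detect_lora_format; infer_instance

-- ===== CLAIM (what is proved, stated in full; the proofs are below) =====
def Claim_equal_detect_lora_format : Prop := ∀ (state_dict : List (String × Int)), Dom_detect_lora_format state_dict → Spec_detect_lora_format state_dict (detect_lora_format state_dict)

-- ===== LEMMAS AND PROOFS =====

-- A's if-chain of any-scans, expressed as a single rank value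
def pvR (xs : List (String × Int)) : Nat :=
  if xs.any (fun kv => PySem.Str.isIn "lora_down" kv.1) then 0
  else if xs.any (fun kv => PySem.Str.isIn "lora_A" kv.1) then 1
  else if (xs.any (fun kv => PySem.Str.isIn ".down.weight" kv.1)
        || xs.any (fun kv => PySem.Str.isIn ".down_proj.weight" kv.1)) then 2
  else 3

theorem pv_bmin (b0 b1 b2 b3 t0 t1 t2 t3 : Bool) :
    min (if b0 then 0 else if b1 then 1 else if b2 || b3 then 2 else 3)
        (if t0 then (0:Nat) else if t1 then 1 else if t2 || t3 then 2 else 3)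
      = (if b0 || t0 then 0 else if b1 || t1 then 1
         else if (b2 || t2) || (b3 || t3) then 2 else 3) := by
  cases b0 <;> cases b1 <;> cases b2 <;> cases b3 <;>
    cases t0 <;> cases t1 <;> cases t2 <;> cases t3 <;> rfl

theorem pv_rank_min (h : String × Int) (t : List (String × Int)) :
    min (pvRank h.1) (pvR t) = pvR (h :: t) := by
  unfold pvRank pvR
  simp only [List.any_cons]
  exact pv_bmin _ _ _ _ _ _ _ _

theorem pvRank_le (k : String) : pvRank k ≤ 3 := by
  unfold pvRank; split_ifs <;> omega

theorem pv_fold_min (xs : List (String × Int)) (a : Nat) (ha : a ≤ 3) :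
    (xs.map (fun kv => pvRank kv.1)).foldl min a = min a (pvR xs) := by
  induction xs generalizing a with
  | nil => simp [pvR, Nat.min_eq_left ha]
  | cons h t ih =>
    rw [List.map_cons, List.foldl_cons,
        ih (min a (pvRank h.1)) (le_trans (Nat.min_le_right _ _) (pvRank_le _)),
        Nat.min_assoc, pv_rank_min]

-- ===== VERDICT (by name: the statement is the Claim_ definition above) =====
theorem detect_lora_format_spec : Claim_equal_detect_lora_format := by
  intro sd _
  unfold Spec_detect_lora_format detect_lora_format detect_lora_format_alt
  rw [pv_fold_min _ 3 (by omega)]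
  simp only [List.any_map, Function.comp_def]
  have hle : pvR sd ≤ 3 := by unfold pvR; split_ifs <;> omega
  rw [min_eq_right hle]
  unfold pvR
  split_ifs <;> rfl
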